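-- pv_equiv track=rewrite | github.com/paradixrain/rytutorial | codewarKata.py | HQ9
-- ===== SOURCE A (Python) =====
-- def HQ9(code):
--     if code[0]=='H':
--         return 'Hello World!'
--     elif code[0]=='Q':
--         return code
--     elif code[0]=='9':
--         outstr=""
--         for i in range(99,2,-1):
--             outstr+="{} bottles of beer on the wall, {} bottles of beer.\nTake one down and pass it around, {} bottles of beer on the wall.\n".format(i,i,i-1)
--         outstr+="2 bottles of beer on the wall, 2 bottles of beer.\nTake one down and pass it around, 1 bottle of beer on the wall.\n1 bottle of beer on the wall, 1 bottle of beer.\nTake one down and pass it around, no more bottles of beer on the wall.\nNo more bottles of beer on the wall, no more bottles of beer.\nGo to the store and buy some more, 99 bottles of beer on the wall."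
--         return outstr
-- ===== SOURCE B (Python) =====
-- def HQ9(code):
--     head = code[0]
--     if head == '9':
--         counts = ["{} bottles".format(n) for n in range(99, 1, -1)] + ["1 bottle", "no more bottles"]
--         body = "".join(
--             "{0} of beer on the wall, {0} of beer.\n"
--             "Take one down and pass it around, {1} of beer on the wall.\n".format(cur, nxt)
--             for cur, nxt in zip(counts, counts[1:]))
--         return body + ("No more bottles of beer on the wall, no more bottles of beer.\n"
--                        "Go to the store and buy some more, 99 bottles of beer on the wall.")
--     return {'H': 'Hello World!', 'Q': code}.get(head)
-- ===== Notes on version B (the rewrite author's own statement) =====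
-- stated objective: idiomatic
-- what changed: The song is rebuilt from a list of count phrases ('99 bottles' ... '1 bottle', 'no more bottles') zipped with its own tail into consecutive pairs and joined, instead of A's numeric 99-to-3 format loop with a hardcoded 2/1/0 tail; the H/Q dispatch becomes a dict lookup instead of an if-chain.
-- outside the precondition, e.g. on HQ9(''): A raises IndexError, B raises IndexError
import Mathlib
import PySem

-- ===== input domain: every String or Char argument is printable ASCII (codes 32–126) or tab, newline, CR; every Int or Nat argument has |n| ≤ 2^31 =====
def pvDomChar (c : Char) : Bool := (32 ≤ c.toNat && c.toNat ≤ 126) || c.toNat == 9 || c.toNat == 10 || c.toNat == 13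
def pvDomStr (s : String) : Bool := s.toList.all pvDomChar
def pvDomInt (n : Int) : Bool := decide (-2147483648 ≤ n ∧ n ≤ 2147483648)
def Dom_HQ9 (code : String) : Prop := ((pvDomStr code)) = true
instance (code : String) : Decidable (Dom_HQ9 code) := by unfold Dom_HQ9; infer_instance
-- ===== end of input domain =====

-- B rebuilds the song from a phrase LIST zipped with its own tail (pairs of consecutive counts)
-- plus a dict-lookup dispatch for H/Q, instead of A's numeric loop with a hardcoded tail (idiomatic; no speed claim).


-- ===== PORT A =====
-- A's '9'-branch string: loop 99..3 appending the formatted verse, then the literal tail.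
def songA : List Char :=
  ((PySem.List.pyRange 99 2 (-1)).foldl (fun s i =>
      s ++ (PySem.Int.toChars i ++ " bottles of beer on the wall, ".toList
        ++ PySem.Int.toChars i ++ " bottles of beer.\nTake one down and pass it around, ".toList
        ++ PySem.Int.toChars (i-1) ++ " bottles of beer on the wall.\n".toList)) [])
  ++ "2 bottles of beer on the wall, 2 bottles of beer.\nTake one down and pass it around, 1 bottle of beer on the wall.\n1 bottle of beer on the wall, 1 bottle of beer.\nTake one down and pass it around, no more bottles of beer on the wall.\nNo more bottles of beer on the wall, no more bottles of beer.\nGo to the store and buy some more, 99 bottles of beer on the wall.".toList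

def HQ9 (code : String) : Option String :=
  match PySem.Str.pyGet? code 0 with
  | none => none                      -- code[0] raises IndexError: outside Pre_
  | some c =>
    if c == 'H' then some "Hello World!"
    else if c == 'Q' then some code
    else if c == '9' then some (String.ofList songA)
    else none                         -- Python's implicit 'return None'

-- ===== PORT B =====
-- counts = ["99 bottles", …, "2 bottles", "1 bottle", "no more bottles"]
def countsB : List (List Char) :=
  ((PySem.List.pyRange 99 1 (-1)).map (fun n => PySem.Int.toChars n ++ " bottles".toList))
    ++ ["1 bottle".toList, "no more bottles".toList]

-- one verse from a (current, next) pair of count phrases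
def pairVerseB (p : List Char × List Char) : List Char :=
  p.1 ++ " of beer on the wall, ".toList ++ p.1
    ++ " of beer.\nTake one down and pass it around, ".toList
    ++ p.2 ++ " of beer on the wall.\n".toList

-- body = "".join over zip(counts, counts[1:]); song = body + final literal verse
def songB : List Char :=
  ((countsB.zip (PySem.List.slice countsB (some 1) none)).map pairVerseB).flatten
    ++ "No more bottles of beer on the wall, no more bottles of beer.\nGo to the store and buy some more, 99 bottles of beer on the wall.".toList

def HQ9_alt (code : String) : Option String :=
  match PySem.Str.pyGet? code 0 with
  | none => none
  | some head =>
    if head == '9' then some (String.ofList songB)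
    else (PySem.Dict.ofList [('H', "Hello World!"), ('Q', code)]).get? head

-- ===== PRECONDITION & SPEC =====
-- Pre_ excludes only the empty string, on which Python A (and B) raise IndexError at code[0].
def Pre_HQ9 (code : String) : Prop := code ≠ ""
instance (code : String) : Decidable (Pre_HQ9 code) := by unfold Pre_HQ9; infer_instance
def pvWitness_HQ9 : String := "9"

def Spec_HQ9 (code : String) (out : Option String) : Prop := out = HQ9_alt code
instance (code : String) (out : Option String) : Decidable (Spec_HQ9 code out) := by unfold Spec_HQ9; infer_instance

-- ===== CLAIM (what is proved, stated in full; the proofs are below) =====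
def Claim_equal_HQ9 : Prop := ∀ (code : String), Dom_HQ9 code → Pre_HQ9 code → Spec_HQ9 code (HQ9 code)

-- ===== LEMMAS AND PROOFS =====
-- a uniform count-phrase function the proof uses to describe countsB
def cnt (n : Int) : List Char :=
  if n == 1 then "1 bottle".toList
  else if n == 0 then "no more bottles".toList
  else PySem.Int.toChars n ++ " bottles".toList

-- B's verse for the pair (i, i-1)
def vB (i : Int) : List Char := pairVerseB (cnt i, cnt (i - 1))

-- A's verse for count i
def vA (i : Int) : List Char :=
  PySem.Int.toChars i ++ " bottles of beer on the wall, ".toList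
    ++ PySem.Int.toChars i ++ " bottles of beer.\nTake one down and pass it around, ".toList
    ++ PySem.Int.toChars (i-1) ++ " bottles of beer on the wall.\n".toList

theorem foldl_flat (g : Int → List Char) : ∀ (L : List Int) (a : List Char),
    L.foldl (fun s i => s ++ g i) a = a ++ (L.map g).flatten := by
  intro L
  induction L with
  | nil => simp
  | cons x xs ih => intro a; simp [List.foldl_cons, ih]

set_option maxRecDepth 10000 in
theorem counts_range : PySem.List.pyRange 99 (-1) (-1) = PySem.List.pyRange 99 1 (-1) ++ [1, 0] := by decide

set_option maxRecDepth 10000 in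
theorem range99_ge3 : ∀ i ∈ PySem.List.pyRange 99 2 (-1), 3 ≤ i := by decide

set_option maxRecDepth 10000 in
theorem pair_range : (PySem.List.pyRange 99 (-1) (-1)).zip ((PySem.List.pyRange 99 (-1) (-1)).tail)
    = (PySem.List.pyRange 99 0 (-1)).map (fun i => (i, i - 1)) := by decide

set_option maxRecDepth 10000 in
theorem range_split2 : PySem.List.pyRange 99 0 (-1) = PySem.List.pyRange 99 2 (-1) ++ [2, 1] := by decide

-- countsB is cnt applied pointwise to 99..0
set_option maxRecDepth 100000 in
theorem counts_eq : countsB = (PySem.List.pyRange 99 (-1) (-1)).map cnt := by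
  rw [countsB, counts_range, List.map_append]; decide

set_option maxRecDepth 10000 in
theorem lit1 : " bottles".toList ++ " of beer on the wall, ".toList = " bottles of beer on the wall, ".toList := by decide
set_option maxRecDepth 40000 in
theorem lit2 : " bottles".toList ++ " of beer.\nTake one down and pass it around, ".toList = " bottles of beer.\nTake one down and pass it around, ".toList := by decide
set_option maxRecDepth 40000 in
theorem lit3 : " bottles".toList ++ " of beer on the wall.\n".toList = " bottles of beer on the wall.\n".toList := by decide

-- for i ≥ 3 B's pair verse is A's formatted verse
theorem verse_agree : ∀ i : Int, 3 ≤ i → vB i = vA i := by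
  intro i hi
  have h0 : (i == (0:Int)) = false := by simp; omega
  have h1 : (i == (1:Int)) = false := by simp; omega
  have h0' : (i - 1 == (0:Int)) = false := by simp; omega
  have h1' : (i - 1 == (1:Int)) = false := by simp; omega
  rw [vB, vA, pairVerseB, cnt, cnt, h0, h1, h0', h1']
  simp only [Bool.false_eq_true, if_false, List.append_assoc, ← lit1, ← lit2, ← lit3]

-- B's verses for (2,1) and (1,0) plus the final literal equal A's hardcoded tail
set_option maxHeartbeats 2000000 in
set_option maxRecDepth 100000 in
theorem tail_eq : vB 2 ++ (vB 1 ++ "No more bottles of beer on the wall, no more bottles of beer.\nGo to the store and buy some more, 99 bottles of beer on the wall.".toList)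
    = "2 bottles of beer on the wall, 2 bottles of beer.\nTake one down and pass it around, 1 bottle of beer on the wall.\n1 bottle of beer on the wall, 1 bottle of beer.\nTake one down and pass it around, no more bottles of beer on the wall.\nNo more bottles of beer on the wall, no more bottles of beer.\nGo to the store and buy some more, 99 bottles of beer on the wall.".toList := by decide

theorem song_eq : songA = songB := by
  rw [songA, songB, foldl_flat, PySem.List.slice_from_one, counts_eq, ← List.map_tail,
      List.zip_map, pair_range]
  simp only [List.map_map]
  have hvB : pairVerseB ∘ Prod.map cnt cnt ∘ (fun i => (i, i - 1)) = vB := by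
    funext i; simp [vB, pairVerseB, Prod.map]
  have hvA : (fun i => PySem.Int.toChars i ++ " bottles of beer on the wall, ".toList
        ++ PySem.Int.toChars i ++ " bottles of beer.\nTake one down and pass it around, ".toList
        ++ PySem.Int.toChars (i-1) ++ " bottles of beer on the wall.\n".toList) = vA := rfl
  rw [hvB, range_split2, List.map_append, List.flatten_append, List.nil_append, hvA,
      List.map_congr_left (fun i hi => (verse_agree i (range99_ge3 i hi)).symm)]
  simp only [List.map_cons, List.map_nil, List.flatten_cons, List.flatten_nil,
      List.append_nil, List.append_assoc]
  exact congrArg (fun t => (List.map vB (PySem.List.pyRange 99 2 (-1))).flatten ++ t) tail_eq.symm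

theorem dispatch_none (c : Char) (code : String) (hH : c ≠ 'H') (hQ : c ≠ 'Q') :
    (PySem.Dict.ofList [('H', "Hello World!"), ('Q', code)]).get? c = none := by
  rw [show PySem.Dict.ofList [('H', "Hello World!"), ('Q', code)]
      = PySem.Dict.mk [('H', "Hello World!"), ('Q', code)] from rfl]
  simp [Ne.symm hH, Ne.symm hQ, PySem.Dict.get?]

-- ===== VERDICT (by name: the statement is the Claim_ definition above) =====
theorem HQ9_spec : Claim_equal_HQ9 := by
  intro code _ _
  unfold Spec_HQ9 HQ9 HQ9_alt
  cases PySem.Str.pyGet? code 0 with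
  | none => rfl
  | some c =>
    by_cases hH : c = 'H'
    · subst hH; rfl
    · by_cases hQ : c = 'Q'
      · subst hQ
        rw [show PySem.Dict.ofList [('H', "Hello World!"), ('Q', code)]
            = PySem.Dict.mk [('H', "Hello World!"), ('Q', code)] from rfl]
        simp [PySem.Dict.get?_mk_cons]
      · by_cases h9 : c = '9'
        · subst h9; simp [song_eq]
        · simp [hH, hQ, h9, dispatch_none c code hH hQ]
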